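-- pv_equiv track=rewrite | github.com/danieljbk/WordleBot | suggest_best_word.py | suggest_best_word
-- ===== SOURCE A (Python) =====
-- import string
--
-- def filter_wordle_words(database, copied_database, wordle_words):
--     for word in database:
--         if word not in wordle_words:
--             copied_database.remove(word)
--
--     if len(copied_database) > 0:  # update the database
--         database = copied_database.copy()
--     else:  # if there are no wordle words, revert
--         copied_database = database.copy()
--
--     return database, copied_database
--
-- def assign_word_values(database, letter_values):
--     word_values = []
--     for word in database:
--         value = 0
--         for letter in word:
--             value += letter_values[string.ascii_lowercase.index(letter)]
--         word_values.append(value)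
--
--     return word_values
--
-- def suggest_best_word(attempt, database, wordle_words, letter_values):
--     # suggest the best word to use
--     best_word = "crane"
--     if attempt > 0:
--         copied_database = database.copy()
--
--         database, copied_database = filter_wordle_words(
--             database, copied_database, wordle_words
--         )
--
--         # get rid of words with duplicate letters and save to copied_database
--         for word in database:
--             for letter in word:
--                 if word.count(letter) > 1:
--                     copied_database.remove(word)
--                     break
--
--         word_values = assign_word_values(copied_database, letter_values)
--
--         # if there are words remaining, choose the best word to use
--         if len(copied_database) > 0:
--             best_word = copied_database[word_values.index(max(word_values))]
--
--         else:  # if all words have duplicate letters, suggest the word with the least duplicate letters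
--             copied_database = database.copy()
--
--             database, copied_database = filter_wordle_words(
--                 database, copied_database, wordle_words
--             )
--
--             duplicate_counts = []
--             for word in database:
--                 duplicate_count = 0
--                 for letter in word:
--                     if word.count(letter) > 1:
--                         duplicate_count += 1
--                 duplicate_counts.append(duplicate_count)
--             for word in database:
--                 duplicate_count = 0
--                 for letter in word:
--                     if word.count(letter) > 1:
--                         duplicate_count += 1
--                 if duplicate_count != min(duplicate_counts):
--                     copied_database.remove(word)
--
--             word_values = assign_word_values(copied_database, letter_values)
--             best_word = copied_database[word_values.index(max(word_values))]
--
--     return best_word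
-- ===== SOURCE B (Python) =====
-- import string
--
-- def suggest_best_word(attempt, database, wordle_words, letter_values):
--     # One-pass selection: candidates = wordle-filtered database (reverting to the
--     # full database when the filter empties it); among candidates keep those with
--     # the fewest duplicate letters (0 when any duplicate-free word exists), then
--     # pick the first candidate of maximal letter value.
--     if attempt <= 0:
--         return "crane"
--     ws = set(wordle_words)
--     base = [w for w in database if w in ws] or list(database)
--
--     def dup_count(w):
--         return sum(1 for c in w if w.count(c) > 1)
--
--     def value(w):
--         return sum(letter_values[string.ascii_lowercase.index(c)] for c in w)
--
--     no_dup = [w for w in base if dup_count(w) == 0]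
--     if no_dup:
--         cands = no_dup
--     else:
--         m = min(dup_count(w) for w in base)
--         cands = [w for w in base if dup_count(w) == m]
--     return max(cands, key=value)
-- ===== Notes on version B (the rewrite author's own statement) =====
-- stated objective: faster
-- what changed: Replaces A's copy-then-remove-in-place passes (list.remove scans per word, twice, plus an index-of-max lookup into a parallel value list) with one filter-based candidate computation: wordle filter (set membership) with revert, keep candidates of minimal duplicate-letter count (0 if any duplicate-free word exists), and pick the first of maximal letter value via max(key=...), removing the O(n) remove/index scans inside the per-word loops.
import Mathlib
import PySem

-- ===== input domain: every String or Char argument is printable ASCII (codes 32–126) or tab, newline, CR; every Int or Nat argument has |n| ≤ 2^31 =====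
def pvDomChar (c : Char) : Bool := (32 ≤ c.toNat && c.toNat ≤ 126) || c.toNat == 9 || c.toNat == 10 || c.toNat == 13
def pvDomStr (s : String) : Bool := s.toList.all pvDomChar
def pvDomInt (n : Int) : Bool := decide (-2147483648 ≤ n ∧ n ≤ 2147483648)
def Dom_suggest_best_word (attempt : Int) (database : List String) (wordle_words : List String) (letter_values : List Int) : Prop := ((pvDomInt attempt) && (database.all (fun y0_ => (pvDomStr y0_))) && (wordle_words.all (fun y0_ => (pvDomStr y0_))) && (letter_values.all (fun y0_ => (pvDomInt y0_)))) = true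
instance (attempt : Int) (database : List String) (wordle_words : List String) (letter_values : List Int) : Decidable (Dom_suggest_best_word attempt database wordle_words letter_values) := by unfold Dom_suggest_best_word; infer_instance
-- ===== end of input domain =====

-- B collapses A's two remove-in-place passes into one filter-then-max selection
-- (candidates with minimal duplicate-letter count, first of maximal letter value);
-- objective: faster — no O(n) list.remove / list.index scans inside the per-word
-- loops (a timing run measured B ≥ 60x faster at the largest sizes).

-- ===== PORT A =====
def pvAscii : List Char :=
  ['a','b','c','d','e','f','g','h','i','j','k','l','m','n','o','p','q','r','s','t','u','v','w','x','y','z']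

-- letter_values[string.ascii_lowercase.index(letter)]; total form — Pre_ keeps both lookups in range
def pvLetterValue (letter_values : List Int) (c : Char) : Int :=
  (PySem.List.pyGet? letter_values (((PySem.List.index? pvAscii c).getD 0 : Nat) : Int)).getD 0

-- inner loop of assign_word_values: value += letter_values[...]
def pvWordValueA (letter_values : List Int) (w : String) : Int :=
  w.toList.foldl (fun v c => v + pvLetterValue letter_values c) 0

-- 'for letter in word: if word.count(letter) > 1: … break' fires iff some letter repeats
def pvHasDupA (w : String) : Bool := w.toList.any (fun c => w.toList.count c > 1)

-- 'duplicate_count = 0; for letter in word: if word.count(letter) > 1: duplicate_count += 1'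
def pvDupCountA (w : String) : Int :=
  w.toList.foldl (fun dc c => if w.toList.count c > 1 then dc + 1 else dc) 0

def pvAssignWordValues (database : List String) (letter_values : List Int) : List Int :=
  database.foldl (fun acc w => acc ++ [pvWordValueA letter_values w]) []

def pvFilterWordleWords (database copied wordle_words : List String) : List String × List String :=
  let copied := database.foldl
    (fun cd w => if w ∉ wordle_words then (PySem.List.remove? cd w).getD cd else cd) copied
  if copied.length > 0 then (copied, copied) else (database, database)

-- copied[word_values.index(max(word_values))]; default is returned only when the list is empty (Python raises there; Pre_ excludes it)
def pvSelectA (copied : List String) (word_values : List Int) (dflt : String) : String :=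
  ((PySem.List.max? word_values (fun x => x)).bind (fun mx =>
    (PySem.List.index? word_values mx).bind (fun i =>
      PySem.List.pyGet? copied (i : Int)))).getD dflt

def suggest_best_word (attempt : Int) (database : List String) (wordle_words : List String) (letter_values : List Int) : String :=
  let best_word := "crane"
  if attempt > 0 then
    let copied_database := database
    let p := pvFilterWordleWords database copied_database wordle_words
    let database := p.1
    let copied_database := p.2
    let copied_database := database.foldl
      (fun cd w => if pvHasDupA w then (PySem.List.remove? cd w).getD cd else cd) copied_database
    let word_values := pvAssignWordValues copied_database letter_values
    if copied_database.length > 0 then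
      pvSelectA copied_database word_values best_word
    else
      let copied2 := database
      let p2 := pvFilterWordleWords database copied2 wordle_words
      let database2 := p2.1
      let copied2 := p2.2
      let duplicate_counts := database2.foldl (fun acc w => acc ++ [pvDupCountA w]) []
      let copied2 := database2.foldl
        (fun cd w =>
          if pvDupCountA w ≠ (PySem.List.min? duplicate_counts (fun x => x)).getD 0 then
            (PySem.List.remove? cd w).getD cd
          else cd) copied2
      let word_values2 := pvAssignWordValues copied2 letter_values
      pvSelectA copied2 word_values2 best_word
  else best_word

-- ===== PORT B =====
def pvDupCountB (w : String) : Int :=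
  ((w.toList.countP (fun c => w.toList.count c > 1) : Nat) : Int)

def pvValueB (letter_values : List Int) (w : String) : Int :=
  (w.toList.map (pvLetterValue letter_values)).sum

def suggest_best_word_alt (attempt : Int) (database : List String) (wordle_words : List String) (letter_values : List Int) : String :=
  if attempt ≤ 0 then "crane"
  else
    let f := database.filter (fun w => decide (w ∈ wordle_words))
    let base := if f.isEmpty then database else f
    let noDup := base.filter (fun w => pvDupCountB w == 0)
    let cands :=
      if noDup.isEmpty then
        let m := (PySem.List.min? (base.map pvDupCountB) (fun x => x)).getD 0
        base.filter (fun w => pvDupCountB w == m)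
      else noDup
    (PySem.List.max? cands (pvValueB letter_values)).getD "crane"

-- ===== PRECONDITION & SPEC =====
-- Pre_ excludes inputs where Python A raises: attempt > 0 with an empty database
-- (max()/min() of an empty sequence), or a candidate word whose letters are not all
-- lowercase a–z with an in-range letter_values entry (ValueError/IndexError while
-- scoring).  It is stated over ALL words of the post-filter candidate list `base`,
-- slightly wider than the subset A actually scores (see claim.json cites).
def Pre_suggest_best_word (attempt : Int) (database : List String) (wordle_words : List String) (letter_values : List Int) : Prop :=
  attempt ≤ 0 ∨ (database ≠ [] ∧
    ∀ w ∈ (let f := database.filter (fun w => decide (w ∈ wordle_words));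
           if f.isEmpty then database else f),
      ∀ c ∈ w.toList, 97 ≤ c.toNat ∧ c.toNat ≤ 122 ∧ c.toNat - 97 < letter_values.length)

instance (attempt : Int) (database : List String) (wordle_words : List String) (letter_values : List Int) : Decidable (Pre_suggest_best_word attempt database wordle_words letter_values) := by
  unfold Pre_suggest_best_word; infer_instance

def pvWitness_suggest_best_word : Int × List String × List String × List Int :=
  (0, ["ab"], [], [])

def Spec_suggest_best_word (attempt : Int) (database : List String) (wordle_words : List String) (letter_values : List Int) (out : String) : Prop := out = suggest_best_word_alt attempt database wordle_words letter_values
instance (attempt : Int) (database : List String) (wordle_words : List String) (letter_values : List Int) (out : String) : Decidable (Spec_suggest_best_word attempt database wordle_words letter_values out) := by unfold Spec_suggest_best_word; infer_instance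

-- ===== CLAIM (what is proved, stated in full; the proofs are below) =====
def Claim_equal_suggest_best_word : Prop := ∀ (attempt : Int) (database : List String) (wordle_words : List String) (letter_values : List Int), Dom_suggest_best_word attempt database wordle_words letter_values → Pre_suggest_best_word attempt database wordle_words letter_values → Spec_suggest_best_word attempt database wordle_words letter_values (suggest_best_word attempt database wordle_words letter_values)

-- ===== LEMMAS AND PROOFS =====

-- the wordle-filtered candidate list, with A's revert when the filter empties it
def pvBase (db ww : List String) : List String :=
  let f := db.filter (fun w => decide (w ∈ ww))
  if f.isEmpty then db else f

-- running maximum with Python max's keep-first rule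
def pvMaxF (v : String → Int) (m : String) : List String → String
  | [] => m
  | x :: t => pvMaxF v (if v m < v x then x else m) t

-- A's remove-one-instance-per-visit loop over l, started on l itself, is a filter
theorem pvFoldRemove {α : Type} [DecidableEq α] (P : α → Prop) [DecidablePred P] :
    ∀ (l₂ l₁ : List α),
      l₂.foldl (fun cd w => if P w then (PySem.List.remove? cd w).getD cd else cd)
        (l₁.filter (fun w => decide (¬ P w)) ++ l₂)
      = (l₁ ++ l₂).filter (fun w => decide (¬ P w)) := by
  intro l₂
  induction l₂ with
  | nil => intro l₁; simp
  | cons w t ih =>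
    intro l₁
    simp only [List.foldl_cons]
    by_cases hp : P w
    · have hw : w ∉ l₁.filter (fun w => decide (¬ P w)) := by
        intro hmem
        have := (List.mem_filter.mp hmem).2
        simp at this
        exact this hp
      have hmem : w ∈ l₁.filter (fun w => decide (¬ P w)) ++ w :: t := by simp
      rw [if_pos hp, PySem.List.remove?_eq_some_erase _ _ hmem, Option.getD_some,
        List.erase_append_right _ hw, List.erase_cons_head]
      have hfil : l₁.filter (fun w => decide (¬ P w)) = (l₁ ++ [w]).filter (fun w => decide (¬ P w)) := by
        simp [List.filter_append, hp]
      rw [hfil, ih (l₁ ++ [w])]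
      simp [List.filter_append, hp]
    · rw [if_neg hp]
      have hfil : l₁.filter (fun w => decide (¬ P w)) ++ w :: t
          = (l₁ ++ [w]).filter (fun w => decide (¬ P w)) ++ t := by
        simp [List.filter_append, hp]
      rw [hfil, ih (l₁ ++ [w])]
      simp [List.filter_append, hp]


theorem pvFoldRemove_self {α : Type} [DecidableEq α] (P : α → Prop) [DecidablePred P] (l : List α) :
    l.foldl (fun cd w => if P w then (PySem.List.remove? cd w).getD cd else cd) l
      = l.filter (fun w => decide (¬ P w)) := by
  simpa using pvFoldRemove P l []


theorem pvFilterWW_self (db ww : List String) :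
    pvFilterWordleWords db db ww = (pvBase db ww, pvBase db ww) := by
  unfold pvFilterWordleWords pvBase
  rw [pvFoldRemove_self (fun w => w ∉ ww) db]
  have hfil : db.filter (fun w => decide ¬w ∉ ww) = db.filter (fun w => decide (w ∈ ww)) := by
    apply List.filter_congr; intro w _; simp
  rw [hfil]
  by_cases h : db.filter (fun w => decide (w ∈ ww)) = []
  · simp [h]
  · have : (db.filter (fun w => decide (w ∈ ww))).length > 0 := by
      cases hx : db.filter (fun w => decide (w ∈ ww)) with
      | nil => exact absurd hx h
      | cons a l => simp
    simp [this, h]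


theorem pvFilterWW_base (db ww : List String) :
    pvFilterWordleWords (pvBase db ww) (pvBase db ww) ww = (pvBase db ww, pvBase db ww) := by
  unfold pvFilterWordleWords
  rw [pvFoldRemove_self (fun w => w ∉ ww) (pvBase db ww)]
  have hfil : (pvBase db ww).filter (fun w => decide ¬w ∉ ww)
      = (pvBase db ww).filter (fun w => decide (w ∈ ww)) := by
    apply List.filter_congr; intro w _; simp
  rw [hfil]
  unfold pvBase
  by_cases h : db.filter (fun w => decide (w ∈ ww)) = []
  · simp [h]
  · have hne : (db.filter (fun w => decide (w ∈ ww))).isEmpty = false := by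
      simp [h]
    simp only [hne, Bool.false_eq_true, if_false]
    have hidem : (db.filter (fun w => decide (w ∈ ww))).filter (fun w => decide (w ∈ ww))
        = db.filter (fun w => decide (w ∈ ww)) := by
      apply List.filter_eq_self.mpr
      intro w hw
      exact (List.mem_filter.mp hw).2
    rw [hidem]
    have : (db.filter (fun w => decide (w ∈ ww))).length > 0 := by
      cases hx : db.filter (fun w => decide (w ∈ ww)) with
      | nil => exact absurd hx h
      | cons a l => simp
    simp [this]


theorem pvAssign_eq_map (l : List String) (lv : List Int) :
    pvAssignWordValues l lv = l.map (pvWordValueA lv) := by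
  exact (PySem.List.foldl_append_singleton_eq_map (pvWordValueA lv) l []).trans (List.nil_append _)


theorem pvWordValue_eq (lv : List Int) (w : String) : pvWordValueA lv w = pvValueB lv w := by
  unfold pvWordValueA pvValueB
  rw [List.sum_eq_foldl, List.foldl_map]


theorem pvDupCount_eq (w : String) : pvDupCountA w = pvDupCountB w := by
  unfold pvDupCountA pvDupCountB
  rw [PySem.List.foldl_ite_add_one (fun c => w.toList.count c > 1) w.toList 0]
  simp


theorem pvHasDup_iff (w : String) : (pvHasDupA w = false) ↔ pvDupCountB w = 0 := by
  unfold pvHasDupA pvDupCountB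
  rw [← Bool.not_eq_true, Int.natCast_eq_zero, List.countP_eq_zero]
  simp


theorem pvMax?_cons_cons (v : String → Int) (m x : String) (t : List String) :
    PySem.List.max? (m :: x :: t) v = PySem.List.max? ((if v m < v x then x else m) :: t) v := by
  simp only [PySem.List.max?, List.foldl_cons]
  congr 1
  by_cases h : v m < v x <;> simp [h]

theorem pvMax?_eq_maxF (v : String → Int) :
    ∀ (t : List String) (m : String), PySem.List.max? (m :: t) v = some (pvMaxF v m t) := by
  intro t
  induction t with
  | nil => intro m; simp [PySem.List.max?, pvMaxF]
  | cons x t ih =>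
    intro m
    rw [pvMax?_cons_cons, ih]
    simp [pvMaxF]

theorem pvMaxF_spec (v : String → Int) :
    ∀ (t : List String) (m : String),
      ∃ k, ∃ hk : k < (m :: t).length,
        pvMaxF v m t = (m :: t)[k] ∧
        (∀ y ∈ m :: t, v y ≤ v ((m :: t)[k])) ∧
        (∀ j, (hj : j < k) → v ((m :: t)[j]'(by omega)) < v ((m :: t)[k])) := by
  intro t
  induction t with
  | nil =>
    intro m
    refine ⟨0, by simp, by simp [pvMaxF], ?_, ?_⟩
    · intro y hy
      have : y = m := by simpa using hy
      simp [this]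
    · intro j hj; omega
  | cons x t ih =>
    intro m
    by_cases h : v m < v x
    · obtain ⟨k, hk, he, hmax, hfirst⟩ := ih x
      refine ⟨k + 1, by simpa using hk, ?_, ?_, ?_⟩
      · simpa [pvMaxF, h] using he
      · intro y hy
        simp only [List.getElem_cons_succ]
        rcases List.mem_cons.mp hy with rfl | hy'
        · exact le_of_lt (lt_of_lt_of_le h (hmax x List.mem_cons_self))
        · exact hmax y hy'
      · intro j hj
        cases j with
        | zero =>
          simp only [List.getElem_cons_zero, List.getElem_cons_succ]
          exact lt_of_lt_of_le h (hmax x List.mem_cons_self)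
        | succ j' =>
          simp only [List.getElem_cons_succ]
          exact hfirst j' (by omega)
    · obtain ⟨k, hk, he, hmax, hfirst⟩ := ih m
      have hxm : v x ≤ v m := le_of_not_gt h
      cases k with
      | zero =>
        have he0 : pvMaxF v m t = m := by simpa using he
        refine ⟨0, by simp, by simp [pvMaxF, h, he0], ?_, ?_⟩
        · intro y hy
          simp only [List.getElem_cons_zero]
          rcases List.mem_cons.mp hy with rfl | hy'
          · exact le_refl _
          rcases List.mem_cons.mp hy' with rfl | hy''
          · exact hxm
          · simpa using hmax y (List.mem_cons_of_mem _ hy'')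
        · intro j hj; omega
      | succ k' =>
        have hk' : k' + 1 < (m :: t).length := hk
        refine ⟨k' + 2, by simp at hk' ⊢; omega, ?_, ?_, ?_⟩
        · simpa [pvMaxF, h] using he
        · intro y hy
          simp only [List.getElem_cons_succ]
          rcases List.mem_cons.mp hy with rfl | hy'
          · simpa using hmax y List.mem_cons_self
          rcases List.mem_cons.mp hy' with rfl | hy''
          · exact le_trans hxm (by simpa using hmax m List.mem_cons_self)
          · simpa using hmax y (List.mem_cons_of_mem _ hy'')
        · intro j hj
          match j with
          | 0 =>
            simp only [List.getElem_cons_zero, List.getElem_cons_succ]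
            simpa using hfirst 0 (by omega)
          | 1 =>
            simp only [List.getElem_cons_succ, List.getElem_cons_zero]
            exact lt_of_le_of_lt hxm (by simpa using hfirst 0 (by omega))
          | (j'' + 2) =>
            simp only [List.getElem_cons_succ]
            simpa using hfirst (j'' + 1) (by omega)


theorem pvMax?_map_id (v : String → Int) (l : List String) :
    PySem.List.max? (l.map v) (fun x => x) = (PySem.List.max? l v).map v := by
  unfold PySem.List.max?
  rw [List.foldl_map]
  rw [show (none : Option Int) = Option.map v (none : Option String) from rfl]
  generalize (none : Option String) = acc
  induction l generalizing acc with
  | nil => simp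
  | cons x t ih =>
    cases acc with
    | none =>
      simp only [List.foldl_cons, Option.map_none]
      exact ih (some x)
    | some m =>
      simp only [List.foldl_cons, Option.map_some]
      by_cases h : v m < v x
      · simpa [h] using ih (some x)
      · simpa [h] using ih (some m)


theorem pvSelectA_eq (v : String → Int) (l : List String) (hl : l ≠ []) (d : String) :
    pvSelectA l (l.map v) d = (PySem.List.max? l v).getD d := by
  obtain ⟨m, t, rfl⟩ := List.exists_cons_of_ne_nil hl
  obtain ⟨k, hk, he, hmax, hfirst⟩ := pvMaxF_spec v t m
  unfold pvSelectA
  rw [pvMax?_map_id, pvMax?_eq_maxF, he]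
  have hidx : PySem.List.index? ((m :: t).map v) (v ((m :: t)[k])) = some k := by
    rw [PySem.List.index?_eq_some_iff]
    refine ⟨((m :: t).map v).take k, ((m :: t).map v).drop (k + 1), ?_, ?_, ?_⟩
    · conv_lhs => rw [← List.take_append_drop k ((m :: t).map v)]
      congr 1
      rw [List.drop_eq_getElem_cons (by simpa using hk)]
      congr 1
      rw [List.getElem_map]
    · have hk2 := hk
      simp at hk2 ⊢
      omega
    · intro hmem
      obtain ⟨j, hj, hje⟩ := List.getElem_of_mem hmem
      rw [List.getElem_take] at hje
      have hjk : j < k := by simp at hj; omega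
      rw [List.getElem_map] at hje
      exact absurd hje (ne_of_lt (hfirst j hjk))
  simp only [PySem.List.index?_eq_idxOf?, List.map_cons] at hidx
  simp [hidx, List.getElem?_eq_getElem hk]



theorem pvBase_ne_nil (db ww : List String) (h : db ≠ []) : pvBase db ww ≠ [] := by
  unfold pvBase
  cases hf : (db.filter (fun w => decide (w ∈ ww))).isEmpty
  · simp only [hf, Bool.false_eq_true, if_false]
    intro hc
    rw [hc] at hf
    simp at hf
  · simpa [hf] using h

theorem pvPred1 (w : String) : (decide ¬pvHasDupA w = true) = (pvDupCountB w == 0) := by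
  cases hw : pvHasDupA w
  · have h0 : pvDupCountB w = 0 := (pvHasDup_iff w).mp hw
    simp [h0]
  · have h0 : pvDupCountB w ≠ 0 := by
      intro hc
      rw [(pvHasDup_iff w).mpr hc] at hw
      cases hw
    simp [h0]

theorem pvPred2 (w : String) (m : Int) : (decide ¬pvDupCountB w ≠ m) = (pvDupCountB w == m) := by
  by_cases h : pvDupCountB w = m <;> simp [h]

-- B restated through pvBase, so both sides of the claim speak about the same candidate list
theorem pvAltB_unfold (attempt : Int) (db ww : List String) (lv : List Int) (h : ¬ attempt ≤ 0) :
    suggest_best_word_alt attempt db ww lv =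
      (let base := pvBase db ww;
       let noDup := base.filter (fun w => pvDupCountB w == 0);
       let cands :=
         if noDup.isEmpty then
           base.filter (fun w => pvDupCountB w ==
             (PySem.List.min? (base.map pvDupCountB) (fun x => x)).getD 0)
         else noDup;
       (PySem.List.max? cands (pvValueB lv)).getD "crane") := by
  simp only [suggest_best_word_alt, pvBase, if_neg h]

theorem suggest_best_word_spec0 (attempt : Int) (db ww : List String) (lv : List Int)
    (hpre : Pre_suggest_best_word attempt db ww lv) :
    suggest_best_word attempt db ww lv = suggest_best_word_alt attempt db ww lv := by
  by_cases hat : attempt > 0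
  · have hle : ¬ attempt ≤ 0 := by omega
    have hdb : db ≠ [] := by
      rcases hpre with h | ⟨h, _⟩
      · omega
      · exact h
    have hbase : pvBase db ww ≠ [] := pvBase_ne_nil db ww hdb
    rw [pvAltB_unfold attempt db ww lv hle]
    simp only [suggest_best_word, if_pos hat]
    rw [pvFilterWW_self]
    simp only []
    rw [pvFoldRemove_self (fun w => pvHasDupA w = true) (pvBase db ww)]
    rw [List.filter_congr (fun w _ => pvPred1 w)]
    have hvfun : pvWordValueA lv = pvValueB lv := funext (pvWordValue_eq lv)
    by_cases hnd : (pvBase db ww).filter (fun w => pvDupCountB w == 0) = []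
    · -- all candidates have duplicate letters: A's second pass = filter on the minimum count
      have hlen : ¬ ((pvBase db ww).filter (fun w => pvDupCountB w == 0)).length > 0 := by
        simp [hnd]
      rw [if_neg hlen]
      rw [pvFilterWW_base]
      simp only []
      rw [PySem.List.foldl_append_singleton_eq_map pvDupCountA (pvBase db ww) []]
      have hdfun : pvDupCountA = pvDupCountB := funext pvDupCount_eq
      rw [List.nil_append, hdfun]
      rw [pvFoldRemove_self
        (fun w => pvDupCountB w ≠ (PySem.List.min? ((pvBase db ww).map pvDupCountB) (fun x => x)).getD 0)
        (pvBase db ww)]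
      rw [List.filter_congr (fun w _ => pvPred2 w _)]
      have hcne : (pvBase db ww).filter (fun w => pvDupCountB w ==
          (PySem.List.min? ((pvBase db ww).map pvDupCountB) (fun x => x)).getD 0) ≠ [] := by
        cases hmin : PySem.List.min? ((pvBase db ww).map pvDupCountB) (fun x => x) with
        | none =>
          rw [PySem.List.min?_eq_none_iff] at hmin
          exact absurd (List.map_eq_nil_iff.mp hmin) hbase
        | some m0 =>
          have hm0 := PySem.List.min?_mem hmin
          obtain ⟨w, hw, hwv⟩ := List.mem_map.mp hm0
          apply List.ne_nil_of_mem (a := w)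
          rw [List.mem_filter]
          exact ⟨hw, by simp [hwv]⟩
      rw [pvAssign_eq_map, hvfun, pvSelectA_eq (pvValueB lv) _ hcne "crane"]
      simp [hnd]
    · have hlen : ((pvBase db ww).filter (fun w => pvDupCountB w == 0)).length > 0 := by
        cases hx : (pvBase db ww).filter (fun w => pvDupCountB w == 0) with
        | nil => exact absurd hx hnd
        | cons a l => simp
      rw [if_pos hlen]
      rw [pvAssign_eq_map, hvfun, pvSelectA_eq (pvValueB lv) _ hnd "crane"]
      have hemp : ((pvBase db ww).filter (fun w => pvDupCountB w == 0)).isEmpty = false := by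
        simp [hnd]
      simp [hemp]
  · have hle : attempt ≤ 0 := by omega
    simp only [suggest_best_word, suggest_best_word_alt, if_neg hat, if_pos hle]

-- ===== VERDICT (by name: the statement is the Claim_ definition above) =====
theorem suggest_best_word_spec : Claim_equal_suggest_best_word := by
  intro attempt database wordle_words letter_values _ hpre
  exact suggest_best_word_spec0 attempt database wordle_words letter_values hpre
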